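-- pv_equiv track=rewrite | github.com/dmeeuwis/advent-of-code | 2019/day1/day1.py | fuel_for_fuel
-- ===== SOURCE A (Python) =====
-- import math
--
-- def fuel(mass):
--     return math.floor(mass / 3) - 2
--
-- def fuel_for_fuel(mass):
--     f0 = fuel(mass)
--     ft = f0
--
--     while f0 > 0:
--         f0 = fuel(f0)
--         if(f0 <= 0):
--             return ft
--         ft += f0
-- ===== SOURCE B (Python) =====
-- def fuel_for_fuel(mass):
--     # recursive: fuel(mass) plus the fuel needed for that fuel, and so on
--     f = mass // 3 - 2
--     if f <= 0:
--         return 0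
--     return f + fuel_for_fuel(f)
-- ===== Notes on version B (the rewrite author's own statement) =====
-- stated objective: simpler
-- what changed: Replaced the while loop with mutable accumulators (and its early-return inside the loop) by a direct recursion on the fuel(x)=x//3-2 recurrence that sums the positive fuel values.
-- outside the precondition, e.g. on fuel_for_fuel(3): A returns None, B returns 0; on fuel_for_fuel(8): A returns None, B returns 0; on fuel_for_fuel(-5): A returns None, B returns 0
import Mathlib
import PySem

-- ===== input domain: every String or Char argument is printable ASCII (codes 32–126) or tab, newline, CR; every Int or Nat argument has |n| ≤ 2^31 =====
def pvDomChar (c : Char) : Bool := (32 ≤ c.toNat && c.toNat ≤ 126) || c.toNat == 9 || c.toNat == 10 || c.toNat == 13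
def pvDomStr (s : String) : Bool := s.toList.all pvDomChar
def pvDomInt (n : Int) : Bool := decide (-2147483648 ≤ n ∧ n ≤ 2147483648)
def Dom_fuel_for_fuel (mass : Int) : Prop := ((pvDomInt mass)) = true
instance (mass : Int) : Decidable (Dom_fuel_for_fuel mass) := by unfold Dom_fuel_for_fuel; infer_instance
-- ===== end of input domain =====

-- B replaces A's while loop with accumulators by a direct recursion on fuel(x)=x//3-2; same cost, simpler.
-- On mass ≤ 8 the Python A falls off its while loop and returns None (no Int); Pre_ excludes exactly those inputs.

-- ===== PORT A =====
-- math.floor(mass / 3): exact floor division for |mass| ≤ 2^31 (float division is exact enough there),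
-- ported as PySem.Int.floordiv.
def pvFuelA (mass : Int) : Int := PySem.Int.floordiv mass 3 - 2

-- the strict decrease the while loop relies on, cited by decreasing_by below
theorem pvFuelA_lt (f0 : Int) (h : 0 < f0) : pvFuelA f0 < f0 := by
  have h3 : (0:Int) < 3 := by omega
  have := PySem.Int.floordiv_eq_ediv_of_pos (a := f0) h3
  have := Int.ediv_le_self 3 (le_of_lt h)
  unfold pvFuelA; omega

-- the while loop of A: state (f0, ft); Python returns None when the loop is never entered (mass ≤ 8),
-- the port returns 0 there (those inputs are outside Pre_).
def pvLoopA (f0 ft : Int) : Int :=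
  if h : 0 < f0 then
    let f1 := pvFuelA f0
    if 0 < f1 then pvLoopA f1 (ft + f1) else ft
  else 0
termination_by f0.toNat
decreasing_by
  have := pvFuelA_lt f0 h
  simp only [f1] at *
  omega

def fuel_for_fuel (mass : Int) : Int :=
  let f0 := pvFuelA mass
  pvLoopA f0 f0

-- ===== PORT B =====
theorem pvFuelB_lt (m : Int) (h : 0 < m / 3 - 2) : m / 3 - 2 < m := by
  have hm : 0 < m := by
    by_contra hc
    have h0 : m / 3 ≤ 0 / 3 := Int.ediv_le_ediv (by omega) (by omega)
    simp at h0
    omega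
  have := Int.ediv_le_self 3 (le_of_lt hm)
  omega

def fuel_for_fuel_alt (mass : Int) : Int :=
  let f := mass / 3 - 2      -- mass // 3 with positive divisor = Lean's Int ediv
  if h : 0 < f then f + fuel_for_fuel_alt f else 0
termination_by mass.toNat
decreasing_by
  have := pvFuelB_lt mass (by simpa [f] using h)
  simp only [f] at *
  omega

-- ===== PRECONDITION & SPEC =====
-- Pre_ excludes mass ≤ 8, on which the Python A returns None (not an int: the while loop is never entered).
def Pre_fuel_for_fuel (mass : Int) : Prop := 9 ≤ mass
instance (mass : Int) : Decidable (Pre_fuel_for_fuel mass) := by unfold Pre_fuel_for_fuel; infer_instance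
def pvWitness_fuel_for_fuel : Int := 100

def Spec_fuel_for_fuel (mass : Int) (out : Int) : Prop := out = fuel_for_fuel_alt mass
instance (mass : Int) (out : Int) : Decidable (Spec_fuel_for_fuel mass out) := by unfold Spec_fuel_for_fuel; infer_instance

-- ===== CLAIM (what is proved, stated in full; the proofs are below) =====
def Claim_equal_fuel_for_fuel : Prop := ∀ (mass : Int), Dom_fuel_for_fuel mass → Pre_fuel_for_fuel mass → Spec_fuel_for_fuel mass (fuel_for_fuel mass)

-- ===== LEMMAS AND PROOFS =====

theorem pvFuelA_eq (m : Int) : pvFuelA m = m / 3 - 2 := by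
  unfold pvFuelA
  rw [PySem.Int.floordiv_eq_ediv_of_pos (by omega : (0:Int) < 3)]

-- loop invariant: for a positive current fuel f0, pvLoopA f0 ft = ft + (sum of the strictly
-- positive iterated fuels below f0) = ft + fuel_for_fuel_alt f0
theorem pvLoopA_eq_alt (f0 ft : Int) (h : 0 < f0) :
    pvLoopA f0 ft = ft + fuel_for_fuel_alt f0 := by
  rw [pvLoopA, fuel_for_fuel_alt]
  simp only [h, dif_pos, pvFuelA_eq]
  by_cases h1 : 0 < f0 / 3 - 2
  · rw [if_pos h1, dif_pos h1,
      pvLoopA_eq_alt (f0 / 3 - 2) (ft + (f0 / 3 - 2)) h1]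
    ring
  · rw [if_neg h1, dif_neg h1]; ring
termination_by f0.toNat
decreasing_by
  have := pvFuelB_lt f0 h1
  omega

-- ===== VERDICT (by name: the statement is the Claim_ definition above) =====
theorem fuel_for_fuel_spec : Claim_equal_fuel_for_fuel := by
  intro mass _ hpre
  unfold Spec_fuel_for_fuel fuel_for_fuel
  have hf : 0 < pvFuelA mass := by
    rw [pvFuelA_eq]
    have : 3 ≤ mass / 3 := by
      rw [Int.le_ediv_iff_mul_le (by omega : (0:Int) < 3)]
      exact hpre
    omega
  have h1 : 0 < mass / 3 - 2 := by rw [pvFuelA_eq] at hf; omega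
  rw [pvLoopA_eq_alt _ _ hf]
  conv_rhs => rw [fuel_for_fuel_alt]
  simp only [h1, dif_pos, pvFuelA_eq]
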